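-- pv_equiv track=rewrite | github.com/nattu22/pptgenerator | src/slidedeckai/content_matcher.py | _is_compatible_story_type
-- ===== SOURCE A (Python) =====
-- def _is_compatible_story_type(layout_story: str, preferred_story: str) -> bool:
--     """Check if layout story type is compatible with preferred"""
--
--     compatible_groups = [
--         {"data_visualization", "metrics_dashboard"},
--         {"balanced_comparison", "hierarchical_story"},
--         {"three_stage_narrative", "feature_grid"},
--         {"focused_message", "main_supporting"}
--     ]
--
--     for group in compatible_groups:
--         if layout_story in group and preferred_story in group:
--             return True
--
--     return False
-- ===== SOURCE B (Python) =====
-- _COMPAT_PAIRS = frozenset(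
--     tuple(sorted((a, b)))
--     for group in (("data_visualization", "metrics_dashboard"),
--                   ("balanced_comparison", "hierarchical_story"),
--                   ("three_stage_narrative", "feature_grid"),
--                   ("focused_message", "main_supporting"))
--     for a in group for b in group
-- )
--
--
-- def _is_compatible_story_type(layout_story: str, preferred_story: str) -> bool:
--     """Check if layout story type is compatible with preferred"""
--     if preferred_story < layout_story:
--         layout_story, preferred_story = preferred_story, layout_story
--     return (layout_story, preferred_story) in _COMPAT_PAIRS
-- ===== Notes on version B (the rewrite author's own statement) =====
-- stated objective: alternative
-- what changed: Instead of scanning a list of group sets testing both names against each, B canonically orders the two names (swap if preferred < layout) and does a single membership test of the ordered pair in a precomputed set of all compatible sorted pairs.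
import Mathlib
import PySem

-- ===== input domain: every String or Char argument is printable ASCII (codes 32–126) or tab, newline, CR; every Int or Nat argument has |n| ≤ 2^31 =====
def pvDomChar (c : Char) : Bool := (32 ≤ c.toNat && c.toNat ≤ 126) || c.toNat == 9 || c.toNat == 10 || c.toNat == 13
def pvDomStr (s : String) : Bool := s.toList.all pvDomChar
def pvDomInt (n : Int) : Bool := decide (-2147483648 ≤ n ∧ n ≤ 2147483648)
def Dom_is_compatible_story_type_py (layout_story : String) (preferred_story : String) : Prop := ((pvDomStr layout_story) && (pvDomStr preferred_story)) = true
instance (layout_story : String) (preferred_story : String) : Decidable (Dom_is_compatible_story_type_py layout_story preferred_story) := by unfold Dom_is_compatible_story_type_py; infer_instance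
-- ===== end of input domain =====

-- B drops A's loop over groups: it canonically orders the two names and tests the ordered
-- pair against a precomputed set of compatible pairs; objective: alternative/simpler.

-- ===== PORT A =====
-- compatible_groups, a list of Python sets
def pvGroupsA : List (PySem.Set String) :=
  [PySem.Set.ofList ["data_visualization", "metrics_dashboard"],
   PySem.Set.ofList ["balanced_comparison", "hierarchical_story"],
   PySem.Set.ofList ["three_stage_narrative", "feature_grid"],
   PySem.Set.ofList ["focused_message", "main_supporting"]]

-- the 'for group in compatible_groups' loop with its early return
def pvLoopA (layout_story preferred_story : String) : List (PySem.Set String) → Bool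
  | [] => false
  | g :: rest =>
    if PySem.Set.contains g layout_story && PySem.Set.contains g preferred_story then true
    else pvLoopA layout_story preferred_story rest

def is_compatible_story_type_py (layout_story : String) (preferred_story : String) : Bool :=
  pvLoopA layout_story preferred_story pvGroupsA

-- ===== PORT B =====
-- the tuples the module-level comprehension ranges over
def pvGroupsB : List (String × String) :=
  [("data_visualization", "metrics_dashboard"),
   ("balanced_comparison", "hierarchical_story"),
   ("three_stage_narrative", "feature_grid"),
   ("focused_message", "main_supporting")]

-- _COMPAT_PAIRS = frozenset(tuple(sorted((a,b))) for group in … for a in group for b in group)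
-- Python's 'b < a' on str is code-point lexicographic: PySem.Chars.strLt on toList (exact)
def pvStrLt (a b : String) : Bool := PySem.Chars.strLt a.toList b.toList

def pvCompatPairs : PySem.Set (String × String) :=
  PySem.Set.ofList (pvGroupsB.flatMap (fun g =>
    [g.1, g.2].flatMap (fun a =>
      [g.1, g.2].map (fun b => if pvStrLt b a then (b, a) else (a, b)))))

def is_compatible_story_type_py_alt (layout_story : String) (preferred_story : String) : Bool :=
  -- if preferred_story < layout_story: swap; then membership test of the ordered pair
  if pvStrLt preferred_story layout_story then
    PySem.Set.contains pvCompatPairs (preferred_story, layout_story)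
  else
    PySem.Set.contains pvCompatPairs (layout_story, preferred_story)

-- ===== PRECONDITION & SPEC =====
def Spec_is_compatible_story_type_py (layout_story : String) (preferred_story : String) (out : Bool) : Prop := out = is_compatible_story_type_py_alt layout_story preferred_story
instance (layout_story : String) (preferred_story : String) (out : Bool) : Decidable (Spec_is_compatible_story_type_py layout_story preferred_story out) := by unfold Spec_is_compatible_story_type_py; infer_instance

-- ===== CLAIM (what is proved, stated in full; the proofs are below) =====
def Claim_equal_is_compatible_story_type_py : Prop := ∀ (layout_story : String) (preferred_story : String), Dom_is_compatible_story_type_py layout_story preferred_story → Spec_is_compatible_story_type_py layout_story preferred_story (is_compatible_story_type_py layout_story preferred_story)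

-- ===== LEMMAS AND PROOFS =====

-- the eight known story-type names
def pvNames : List String :=
  ["data_visualization", "metrics_dashboard", "balanced_comparison", "hierarchical_story",
   "three_stage_narrative", "feature_grid", "focused_message", "main_supporting"]

theorem pv_a_unknown_left (l p : String) (h : l ∉ pvNames) :
    is_compatible_story_type_py l p = false := by
  simp only [pvNames, List.mem_cons, not_or] at h
  obtain ⟨h1, h2, h3, h4, h5, h6, h7, h8, -⟩ := h
  simp [is_compatible_story_type_py, pvGroupsA, pvLoopA, PySem.Set.contains, PySem.Set.ofList,
    h1, h2, h3, h4, h5, h6, h7, h8]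

theorem pvCompatPairs_eq : pvCompatPairs =
    [("data_visualization", "data_visualization"), ("data_visualization", "metrics_dashboard"),
     ("metrics_dashboard", "metrics_dashboard"),
     ("balanced_comparison", "balanced_comparison"), ("balanced_comparison", "hierarchical_story"),
     ("hierarchical_story", "hierarchical_story"),
     ("three_stage_narrative", "three_stage_narrative"), ("feature_grid", "three_stage_narrative"),
     ("feature_grid", "feature_grid"),
     ("focused_message", "focused_message"), ("focused_message", "main_supporting"),
     ("main_supporting", "main_supporting")] := by decide

theorem pv_b_unknown_left (l p : String) (h : l ∉ pvNames) :
    is_compatible_story_type_py_alt l p = false := by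
  simp only [pvNames, List.mem_cons, not_or] at h
  obtain ⟨h1, h2, h3, h4, h5, h6, h7, h8, -⟩ := h
  unfold is_compatible_story_type_py_alt
  rw [pvCompatPairs_eq]
  split_ifs <;>
    simp [PySem.Set.contains, Prod.ext_iff, h1, h2, h3, h4, h5, h6, h7, h8]

theorem pv_a_unknown_right (l p : String) (h : p ∉ pvNames) :
    is_compatible_story_type_py l p = false := by
  simp only [pvNames, List.mem_cons, not_or] at h
  obtain ⟨h1, h2, h3, h4, h5, h6, h7, h8, -⟩ := h
  simp [is_compatible_story_type_py, pvGroupsA, pvLoopA, PySem.Set.contains, PySem.Set.ofList,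
    h1, h2, h3, h4, h5, h6, h7, h8]

theorem pv_b_unknown_right (l p : String) (h : p ∉ pvNames) :
    is_compatible_story_type_py_alt l p = false := by
  simp only [pvNames, List.mem_cons, not_or] at h
  obtain ⟨h1, h2, h3, h4, h5, h6, h7, h8, -⟩ := h
  unfold is_compatible_story_type_py_alt
  rw [pvCompatPairs_eq]
  split_ifs <;>
    simp [PySem.Set.contains, Prod.ext_iff, h1, h2, h3, h4, h5, h6, h7, h8]

set_option maxHeartbeats 2000000 in
theorem pv_eq (l p : String) :
    is_compatible_story_type_py l p = is_compatible_story_type_py_alt l p := by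
  by_cases hl : l ∈ pvNames
  · by_cases hp : p ∈ pvNames
    · fin_cases hl <;> fin_cases hp <;> decide
    · rw [pv_a_unknown_right l p hp, pv_b_unknown_right l p hp]
  · rw [pv_a_unknown_left l p hl, pv_b_unknown_left l p hl]

-- ===== VERDICT (by name: the statement is the Claim_ definition above) =====
theorem is_compatible_story_type_py_spec : Claim_equal_is_compatible_story_type_py := by
  intro l p _
  unfold Spec_is_compatible_story_type_py
  exact pv_eq l p
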